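-- pv_equiv track=rewrite | github.com/umass-ml4ed/socratic-quest-gen | generate_bad_questions.py | construct_input_data
-- ===== SOURCE A (Python) =====
-- def construct_input_data(turns):
--     '''
--     construct data for inputting to the question generator
--     '''
--     all_input_data = []
--     for ctr, turn in enumerate(turns):
--         # strip the Assistant turn
--         current_turn = turn[:turn.find('Assistant:')].strip()
--         # iterate over all previous turns
--         all_prev_turns = ''
--         for prev_turn in turns[:ctr]:
--             all_prev_turns += prev_turn
--         # construct input data
--         input_data = all_prev_turns + current_turn + 'Assistant:\n'
--         all_input_data.append(input_data)
--
--     return all_input_data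
-- ===== SOURCE B (Python) =====
-- def construct_input_data(turns):
--     '''
--     construct data for inputting to the question generator
--     '''
--     all_input_data = []
--     prefix = ''
--     for turn in turns:
--         current_turn = turn[:turn.find('Assistant:')].strip()
--         all_input_data.append(prefix + current_turn + 'Assistant:\n')
--         prefix += turn
--     return all_input_data
-- ===== Notes on version B (the rewrite author's own statement) =====
-- stated objective: faster
-- what changed: B keeps a running prefix accumulator updated once per turn instead of rebuilding the concatenation of all previous turns with an inner loop at every iteration, turning the nested O(n^2) scan into a single pass.
import Mathlib
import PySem

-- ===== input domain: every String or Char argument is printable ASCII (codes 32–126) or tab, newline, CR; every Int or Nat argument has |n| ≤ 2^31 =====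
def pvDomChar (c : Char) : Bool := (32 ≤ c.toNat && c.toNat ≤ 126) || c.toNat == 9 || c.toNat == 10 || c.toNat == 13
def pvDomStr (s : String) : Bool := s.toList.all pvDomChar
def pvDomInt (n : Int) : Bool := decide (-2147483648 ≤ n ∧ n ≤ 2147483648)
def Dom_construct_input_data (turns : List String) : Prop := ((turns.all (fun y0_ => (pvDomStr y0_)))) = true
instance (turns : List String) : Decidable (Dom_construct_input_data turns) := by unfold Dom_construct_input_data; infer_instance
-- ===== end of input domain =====

-- B replaces A's inner loop (rebuilding the concatenation of all previous turns each iteration)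
-- by a running prefix accumulator updated once per turn: a single pass instead of nested passes.

-- ===== PORT A =====
def construct_input_data (turns : List String) : List String :=
  (PySem.List.enumerate turns 0).foldl
    (fun all_input_data p =>
      -- strip the Assistant turn
      -- iterate over all previous turns, then construct input data
      all_input_data ++
        [((PySem.List.slice turns none (some p.1)).foldl (fun s t => s ++ t) "") ++
          PySem.Str.strip (PySem.Str.slice p.2 none (some (PySem.Str.find p.2 "Assistant:"))) ++
          "Assistant:\n"]) []

-- ===== PORT B =====
def construct_input_data_alt (turns : List String) : List String :=
  (turns.foldl
    (fun (st : String × List String) turn =>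
      (st.1 ++ turn,
       st.2 ++ [st.1 ++
         PySem.Str.strip (PySem.Str.slice turn none (some (PySem.Str.find turn "Assistant:"))) ++
         "Assistant:\n"]))
    ("", [])).2

-- ===== PRECONDITION & SPEC =====
def Spec_construct_input_data (turns : List String) (out : List String) : Prop := out = construct_input_data_alt turns
instance (turns : List String) (out : List String) : Decidable (Spec_construct_input_data turns out) := by unfold Spec_construct_input_data; infer_instance

-- ===== CLAIM (what is proved, stated in full; the proofs are below) =====
def Claim_equal_construct_input_data : Prop := ∀ (turns : List String), Dom_construct_input_data turns → Spec_construct_input_data turns (construct_input_data turns)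

-- ===== LEMMAS AND PROOFS =====

/-- Loop correspondence: A's enumerate-fold (with its inner rebuild of the prefix as a fold over
a slice of the full list) equals B's single fold carrying the running prefix, for any processed
prefix `done` and output accumulator `acc`. -/
lemma pv_key (f : String → String) (nl : String) :
    ∀ (rest done acc : List String),
    (PySem.List.enumerate rest ((done.length : Nat) : Int)).foldl
        (fun a p =>
          a ++ [((PySem.List.slice (done ++ rest) none (some p.1)).foldl (fun s t => s ++ t) "") ++
                 f p.2 ++ nl]) acc
    = (rest.foldl (fun st turn => (st.1 ++ turn, st.2 ++ [st.1 ++ f turn ++ nl]))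
        (done.foldl (fun s t => s ++ t) "", acc)).2 := by
  intro rest
  induction rest with
  | nil => intro done acc; simp [PySem.List.enumerate_nil]
  | cons t rest ih =>
    intro done acc
    rw [PySem.List.enumerate_cons, List.foldl_cons, List.foldl_cons]
    have hs : PySem.List.slice (done ++ t :: rest) none (some ((done.length : Nat) : Int)) = done := by
      rw [PySem.List.slice_to_natCast]; exact List.take_left
    rw [hs]
    have h1 : ((done.length : Nat) : Int) + 1 = (((done ++ [t]).length : Nat) : Int) := by
      simp
    have h2 : done ++ t :: rest = (done ++ [t]) ++ rest := by simp
    rw [h1, h2, ih (done ++ [t])]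
    simp [List.foldl_append]

-- ===== VERDICT (by name: the statement is the Claim_ definition above) =====
theorem construct_input_data_spec : Claim_equal_construct_input_data := by
  intro turns _
  unfold Spec_construct_input_data construct_input_data construct_input_data_alt
  have h := pv_key
      (fun turn => PySem.Str.strip (PySem.Str.slice turn none (some (PySem.Str.find turn "Assistant:"))))
      "Assistant:\n" turns [] []
  simpa using h
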